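-- pv_equiv track=rewrite | github.com/va64doman/codility | Challenges/theGreatCodeOff2021.py | cakeFactory
-- ===== SOURCE A (Python) =====
-- def cakeFactory(N, K, A, B, C):
--     base = 1
--     while base < N: base *= 2
--     tree = [(0,0)] * (base * 2)
--
--     def combine(p1, p2):
--         c1, s1 = p1
--         c2, s2 = p2
--         if s1 == -1 or s2 == -1: return (0, -1)
--         elif s1 == 0: return p2
--         elif s2 == 0: return p1
--         elif c1 + s1 == c2: return (c1, s1 + s2)
--         else: return (0, -1)
--         pass
--
--     def tree_add(v, xl, xr, a, b, c):
--         if b < xl or xr < a: return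
--         elif a <= xl and xr <= b: tree[v] = combine(tree[v], (c,1))
--         else:
--             tree[2*v] = combine(tree[2*v], tree[v])
--             tree[2*v+1] = combine(tree[2*v+1], tree[v])
--             tree[v] = (0,0)
--             xm = (xl + xr) // 2
--             tree_add(2*v, xl, xm, a, b, c)
--             tree_add(2*v+1, xm+1, xr, a, b, c)
--         pass
--
--     for a,b,c in zip(A, B, C):
--         tree_add(1, 0, base-1, a-1, b-1, c)
--
--     def tree_count(v):
--         if v >= base:
--             c, s = tree[v]
--             return int(c == 1 and s == K)
--         else:
--             tree[2*v] = combine(tree[2*v], tree[v])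
--             tree[2*v+1] = combine(tree[2*v+1], tree[v])
--             return tree_count(2*v) + tree_count(2*v+1)
--         pass
--
--     return tree_count(1)
--     pass
-- ===== SOURCE B (Python) =====
-- def cakeFactory(N, K, A, B, C):
--     # simpler: per-cell simulation over [0, base); fold the covering updates in
--     # input order through the run-merging rule instead of a lazy segment tree
--     base = 1
--     while base < N:
--         base *= 2
--     count = 0
--     for pos in range(base):
--         c0, s0 = 0, 0
--         for a, b, c in zip(A, B, C):
--             if a - 1 <= pos <= b - 1:
--                 if s0 == -1:
--                     pass
--                 elif s0 == 0:
--                     c0, s0 = c, 1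
--                 elif c0 + s0 == c:
--                     s0 += 1
--                 else:
--                     c0, s0 = 0, -1
--         if c0 == 1 and s0 == K:
--             count += 1
--     return count
-- ===== Notes on version B (the rewrite author's own statement) =====
-- stated objective: simpler
-- what changed: Replaces A's lazy segment tree (recursive range updates with push-down and a counting pass over the tree) by a direct per-cell simulation: for each cell in [0, base) fold the covering updates in input order through the same run-merging rule and count the qualifying cells.
import Mathlib
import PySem

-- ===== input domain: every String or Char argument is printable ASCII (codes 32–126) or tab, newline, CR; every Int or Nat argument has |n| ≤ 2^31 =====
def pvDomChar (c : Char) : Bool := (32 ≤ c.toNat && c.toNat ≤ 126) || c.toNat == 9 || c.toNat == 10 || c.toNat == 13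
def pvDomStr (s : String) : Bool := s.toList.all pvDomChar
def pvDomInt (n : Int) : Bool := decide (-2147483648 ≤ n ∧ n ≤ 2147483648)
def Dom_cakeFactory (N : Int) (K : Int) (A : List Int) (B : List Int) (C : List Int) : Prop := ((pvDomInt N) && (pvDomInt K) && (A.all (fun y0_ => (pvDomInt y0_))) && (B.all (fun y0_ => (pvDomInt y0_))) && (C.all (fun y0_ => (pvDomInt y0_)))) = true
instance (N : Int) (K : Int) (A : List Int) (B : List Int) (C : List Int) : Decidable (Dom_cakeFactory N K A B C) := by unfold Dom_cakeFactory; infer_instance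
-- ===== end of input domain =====

-- B replaces A's lazy segment tree by a direct per-cell fold over the updates (simpler, not faster).

-- ===== PORT A =====
-- 'while base < N: base *= 2'; fuel 64 only makes the loop total, it is never
-- exhausted for |N| ≤ 2^31 (doubling from 1 exceeds 2^31 after 32 steps).
def pvPow2Loop : Nat → Int → Int → Int
  | 0, _, base => base
  | f + 1, n, base => if base < n then pvPow2Loop f n (base * 2) else base

def pvCombine (p1 p2 : Int × Int) : Int × Int :=
  if p1.2 = -1 ∨ p2.2 = -1 then (0, -1)
  else if p1.2 = 0 then p2
  else if p2.2 = 0 then p1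
  else if p1.1 + p1.2 = p2.1 then (p1.1, p1.2 + p2.2)
  else (0, -1)

-- the Python list 'tree': every read/write index is in range at run time, so
-- getD/setIfInBounds are exact for the reads and writes the Python performs
def pvTreeAddA (t : Array (Int × Int)) (v : Nat) (xl xr a b c : Int) : Array (Int × Int) :=
  if hdis : b < xl ∨ xr < a then t
  else if hcov : a ≤ xl ∧ xr ≤ b then
    t.setIfInBounds v (pvCombine (t.getD v (0, 0)) (c, 1))
  else
    let t1 := t.setIfInBounds (2 * v) (pvCombine (t.getD (2 * v) (0, 0)) (t.getD v (0, 0)))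
    let t2 := t1.setIfInBounds (2 * v + 1)
      (pvCombine (t1.getD (2 * v + 1) (0, 0)) (t1.getD v (0, 0)))
    let t3 := t2.setIfInBounds v (0, 0)
    let xm := PySem.Int.floordiv (xl + xr) 2
    pvTreeAddA (pvTreeAddA t3 (2 * v) xl xm a b c) (2 * v + 1) (xm + 1) xr a b c
termination_by (xr - xl).toNat
decreasing_by
  · have hlt : xl < xr := by omega
    have h1 : xl ≤ PySem.Int.floordiv (xl + xr) 2 ∧ PySem.Int.floordiv (xl + xr) 2 ≤ xr :=
      PySem.Int.floordiv_two_mid_bounds (by omega)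
    have h2 : PySem.Int.floordiv (xl + xr) 2 < xr :=
      (PySem.Int.floordiv_lt_iff_lt_mul (by omega)).mpr (by omega)
    omega
  · have hlt : xl < xr := by omega
    have h1 : xl ≤ PySem.Int.floordiv (xl + xr) 2 ∧ PySem.Int.floordiv (xl + xr) 2 ≤ xr :=
      PySem.Int.floordiv_two_mid_bounds (by omega)
    omega

-- fuel = recursion depth bound; the caller passes (2*base).toNat which always suffices
def pvTreeCountA (K base : Int) : Nat → Array (Int × Int) → Nat → Int × Array (Int × Int)
  | 0, t, _ => (0, t)
  | f + 1, t, v =>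
    if base ≤ (v : Int) then
      ((if (t.getD v (0, 0)).1 = 1 ∧ (t.getD v (0, 0)).2 = K then 1 else 0), t)
    else
      let t1 := t.setIfInBounds (2 * v) (pvCombine (t.getD (2 * v) (0, 0)) (t.getD v (0, 0)))
      let t2 := t1.setIfInBounds (2 * v + 1)
        (pvCombine (t1.getD (2 * v + 1) (0, 0)) (t1.getD v (0, 0)))
      let r1 := pvTreeCountA K base f t2 (2 * v)
      let r2 := pvTreeCountA K base f r1.2 (2 * v + 1)
      (r1.1 + r2.1, r2.2)

def cakeFactory (N : Int) (K : Int) (A : List Int) (B : List Int) (C : List Int) : Int :=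
  let base := pvPow2Loop 64 N 1
  let t0 : Array (Int × Int) := Array.replicate (2 * base).toNat (0, 0)
  let t := (A.zip (B.zip C)).foldl
    (fun t u => pvTreeAddA t 1 0 (base - 1) (u.1 - 1) (u.2.1 - 1) u.2.2) t0
  (pvTreeCountA K base (2 * base).toNat t 1).1

-- ===== PORT B =====
def pvCellStep (pos : Int) (st : Int × Int) (u : Int × Int × Int) : Int × Int :=
  if u.1 - 1 ≤ pos ∧ pos ≤ u.2.1 - 1 then
    if st.2 = -1 then st
    else if st.2 = 0 then (u.2.2, 1)
    else if st.1 + st.2 = u.2.2 then (st.1, st.2 + 1)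
    else (0, -1)
  else st

def cakeFactory_alt (N : Int) (K : Int) (A : List Int) (B : List Int) (C : List Int) : Int :=
  let base := pvPow2Loop 64 N 1
  (PySem.List.pyRange 0 base 1).foldl
    (fun cnt pos =>
      let st := (A.zip (B.zip C)).foldl (pvCellStep pos) (0, 0)
      cnt + (if st.1 = 1 ∧ st.2 = K then 1 else 0)) 0

-- ===== PRECONDITION & SPEC =====
def Spec_cakeFactory (N : Int) (K : Int) (A : List Int) (B : List Int) (C : List Int) (out : Int) : Prop := out = cakeFactory_alt N K A B C
instance (N : Int) (K : Int) (A : List Int) (B : List Int) (C : List Int) (out : Int) : Decidable (Spec_cakeFactory N K A B C out) := by unfold Spec_cakeFactory; infer_instance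

-- ===== CLAIM (what is proved, stated in full; the proofs are below) =====
def Claim_equal_cakeFactory : Prop := ∀ (N : Int) (K : Int) (A : List Int) (B : List Int) (C : List Int), Dom_cakeFactory N K A B C → Spec_cakeFactory N K A B C (cakeFactory N K A B C)

-- ===== LEMMAS AND PROOFS =====

-- proof model of the tree: the array as a total map, with the same operations
def pvUpd (t : Nat → Int × Int) (i : Nat) (x : Int × Int) : Nat → Int × Int :=
  fun j => if j = i then x else t j

def pvTreeAdd (t : Nat → Int × Int) (v : Nat) (xl xr a b c : Int) : Nat → Int × Int :=
  if hdis : b < xl ∨ xr < a then t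
  else if hcov : a ≤ xl ∧ xr ≤ b then pvUpd t v (pvCombine (t v) (c, 1))
  else
    let t1 := pvUpd t (2 * v) (pvCombine (t (2 * v)) (t v))
    let t2 := pvUpd t1 (2 * v + 1) (pvCombine (t1 (2 * v + 1)) (t1 v))
    let t3 := pvUpd t2 v (0, 0)
    let xm := PySem.Int.floordiv (xl + xr) 2
    pvTreeAdd (pvTreeAdd t3 (2 * v) xl xm a b c) (2 * v + 1) (xm + 1) xr a b c
termination_by (xr - xl).toNat
decreasing_by
  · have hlt : xl < xr := by omega
    have h1 : xl ≤ PySem.Int.floordiv (xl + xr) 2 ∧ PySem.Int.floordiv (xl + xr) 2 ≤ xr :=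
      PySem.Int.floordiv_two_mid_bounds (by omega)
    have h2 : PySem.Int.floordiv (xl + xr) 2 < xr :=
      (PySem.Int.floordiv_lt_iff_lt_mul (by omega)).mpr (by omega)
    omega
  · have hlt : xl < xr := by omega
    have h1 : xl ≤ PySem.Int.floordiv (xl + xr) 2 ∧ PySem.Int.floordiv (xl + xr) 2 ≤ xr :=
      PySem.Int.floordiv_two_mid_bounds (by omega)
    omega

def pvTreeCount (K base : Int) : Nat → (Nat → Int × Int) → Nat → Int × (Nat → Int × Int)
  | 0, t, _ => (0, t)
  | f + 1, t, v =>
    if base ≤ (v : Int) then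
      ((if (t v).1 = 1 ∧ (t v).2 = K then 1 else 0), t)
    else
      let t1 := pvUpd t (2 * v) (pvCombine (t (2 * v)) (t v))
      let t2 := pvUpd t1 (2 * v + 1) (pvCombine (t1 (2 * v + 1)) (t1 v))
      let r1 := pvTreeCount K base f t2 (2 * v)
      let r2 := pvTreeCount K base f r1.2 (2 * v + 1)
      (r1.1 + r2.1, r2.2)

-- view of an array as a total map
def pvToFun (t : Array (Int × Int)) : Nat → Int × Int := fun j => t.getD j (0, 0)

theorem pvToFun_set {t : Array (Int × Int)} {i : Nat} (h : i < t.size) (x : Int × Int) :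
    pvToFun (t.setIfInBounds i x) = pvUpd (pvToFun t) i x := by
  funext j
  simp only [pvToFun, pvUpd, Array.getD, Array.size_setIfInBounds]
  by_cases hj : j = i
  · subst hj
    simp [h, Array.getElem_setIfInBounds_self]
  · by_cases hlt : j < t.size
    · simp only [hlt, dite_true, if_neg hj]
      exact Array.getElem_setIfInBounds_ne hlt (fun a => hj a.symm)
    · simp [hlt, hj]

theorem pvGetD_set {t : Array (Int × Int)} {i : Nat} (h : i < t.size) (x : Int × Int)
    (j : Nat) : (t.setIfInBounds i x).getD j (0, 0) = pvUpd (pvToFun t) i x j :=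
  congrFun (pvToFun_set h x) j

theorem pvToFun_replicate (n : Nat) :
    pvToFun (Array.replicate n ((0 : Int), (0 : Int))) = fun _ => ((0 : Int), (0 : Int)) := by
  funext j
  simp only [pvToFun, Array.getD, Array.size_replicate]
  by_cases h : j < n <;> simp [h]

-- reachable tree values: the identity, the bottom, or a run of length ≥ 1
def pvGood (p : Int × Int) : Prop := p = (0, 0) ∨ p = (0, -1) ∨ 1 ≤ p.2

def pvAllGood (t : Nat → Int × Int) : Prop := ∀ i, pvGood (t i)

theorem pvCombine_bot_left (w : Int × Int) : pvCombine (0, -1) w = (0, -1) := by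
  unfold pvCombine; split_ifs <;> simp_all

theorem pvCombine_bot_right (w : Int × Int) : pvCombine w (0, -1) = (0, -1) := by
  unfold pvCombine; split_ifs <;> simp_all

set_option maxHeartbeats 1000000 in
theorem pvCombine_good {x y : Int × Int} (hx : pvGood x) (hy : pvGood y) :
    pvGood (pvCombine x y) := by
  obtain ⟨xc, xs⟩ := x; obtain ⟨yc, ys⟩ := y
  unfold pvGood at *; unfold pvCombine
  split_ifs <;> simp_all <;> omega

theorem pvCombine_zero_left {y : Int × Int} (hy : pvGood y) : pvCombine (0, 0) y = y := by
  obtain ⟨yc, ys⟩ := y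
  unfold pvGood at hy; unfold pvCombine
  split_ifs <;> simp_all <;> omega

theorem pvCombine_zero_right {x : Int × Int} (hx : pvGood x) : pvCombine x (0, 0) = x := by
  obtain ⟨xc, xs⟩ := x
  unfold pvGood at hx; unfold pvCombine
  split_ifs <;> simp_all <;> omega

theorem pvCombine_pos {c1 s1 c2 s2 : Int} (h1 : 1 ≤ s1) (h2 : 1 ≤ s2) :
    pvCombine (c1, s1) (c2, s2) = if c1 + s1 = c2 then (c1, s1 + s2) else (0, -1) := by
  unfold pvCombine; split_ifs <;> simp_all <;> omega

set_option maxHeartbeats 1000000 in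
theorem pvCombine_assoc {x y z : Int × Int} (hx : pvGood x) (hy : pvGood y) (hz : pvGood z) :
    pvCombine (pvCombine x y) z = pvCombine x (pvCombine y z) := by
  rcases hx with rfl | rfl | hx
  · rw [pvCombine_zero_left hy, pvCombine_zero_left (pvCombine_good hy hz)]
  · rw [pvCombine_bot_left, pvCombine_bot_left, pvCombine_bot_left]
  · rcases hy with rfl | rfl | hy
    · rw [pvCombine_zero_right (Or.inr (Or.inr hx)), pvCombine_zero_left hz]
    · rw [pvCombine_bot_right, pvCombine_bot_left, pvCombine_bot_right]
    · rcases hz with rfl | rfl | hz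
      · rw [pvCombine_zero_right (pvCombine_good (Or.inr (Or.inr hx)) (Or.inr (Or.inr hy))),
            pvCombine_zero_right (Or.inr (Or.inr hy))]
      · rw [pvCombine_bot_right, pvCombine_bot_right, pvCombine_bot_right]
      · obtain ⟨xc, xs⟩ := x; obtain ⟨yc, ys⟩ := y; obtain ⟨zc, zs⟩ := z
        simp only at hx hy hz
        rw [pvCombine_pos hx hy, pvCombine_pos hy hz]
        by_cases hab : xc + xs = yc
        · by_cases hbc : yc + ys = zc
          · rw [if_pos hab, if_pos hbc, pvCombine_pos (by omega) hz, pvCombine_pos hx (by omega),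
                if_pos (by omega), if_pos hab]
            simp [add_assoc]
          · rw [if_pos hab, if_neg hbc, pvCombine_pos (by omega) hz, pvCombine_bot_right,
                if_neg (by omega)]
        · by_cases hbc : yc + ys = zc
          · rw [if_neg hab, if_pos hbc, pvCombine_bot_left, pvCombine_pos hx (by omega),
                if_neg (by omega)]
          · rw [if_neg hab, if_neg hbc, pvCombine_bot_left, pvCombine_bot_right]

-- the value tree_count resolves at leaf ℓ below node v: t ℓ ⊕ (t (ℓ/2) ⊕ (… ⊕ t v))
def pvRR (t : Nat → Int × Int) (v ℓ : Nat) : Int × Int :=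
  if ℓ ≤ v then t v else pvCombine (t ℓ) (pvRR t v (ℓ / 2))
termination_by ℓ
decreasing_by exact Nat.div_lt_self (by omega) (by omega)

-- subtree membership: v is an ancestor of j
def pvInSub (v j : Nat) : Prop := ∃ k, j / 2 ^ k = v

theorem pvInSub_self (v : Nat) : pvInSub v v := ⟨0, by simp⟩

theorem pvInSub_left (v : Nat) : pvInSub v (2 * v) := ⟨1, by omega⟩

theorem pvInSub_right (v : Nat) : pvInSub v (2 * v + 1) := ⟨1, by omega⟩

theorem pvInSub_trans {v c j : Nat} (h1 : pvInSub v c) (h2 : pvInSub c j) : pvInSub v j := by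
  obtain ⟨m, hm⟩ := h1; obtain ⟨k, hk⟩ := h2
  exact ⟨k + m, by rw [pow_add, ← Nat.div_div_eq_div_mul, hk, hm]⟩

theorem pvInSub_le {v j : Nat} (h : pvInSub v j) : v ≤ j := by
  obtain ⟨k, hk⟩ := h; subst hk; exact Nat.div_le_self _ _

theorem pvInSub_step {c ℓ : Nat} (hc : 1 ≤ c) (h : pvInSub c ℓ) (hne : ℓ ≠ c) :
    pvInSub c (ℓ / 2) ∧ c < ℓ := by
  obtain ⟨k, hk⟩ := h
  match k, hk with
  | 0, hk => simp at hk; omega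
  | k + 1, hk =>
    have h1 : pvInSub c (ℓ / 2) := by
      refine ⟨k, ?_⟩
      rw [Nat.div_div_eq_div_mul, ← hk]
      congr 1
      rw [pow_succ]; ring
    have h2 : c * 2 ^ (k + 1) ≤ ℓ := by
      rw [← hk]
      exact Nat.div_mul_le_self ℓ _
    have h3 : 2 ≤ 2 ^ (k + 1) := by
      calc (2 : Nat) = 2 ^ 1 := by norm_num
        _ ≤ 2 ^ (k + 1) := Nat.pow_le_pow_right (by omega) (by omega)
    have h4 : 2 * c ≤ ℓ := le_trans (by nlinarith) h2
    exact ⟨h1, by omega⟩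

-- ancestors of a node are totally ordered
theorem pvInSub_total {a b j : Nat} (ha : pvInSub a j) (hb : pvInSub b j) :
    pvInSub a b ∨ pvInSub b a := by
  obtain ⟨k, hk⟩ := ha; obtain ⟨m, hm⟩ := hb
  rcases le_total k m with h | h
  · right
    refine ⟨m - k, ?_⟩
    rw [← hk, Nat.div_div_eq_div_mul, ← pow_add, ← hm]
    congr 2
    omega
  · left
    refine ⟨k - m, ?_⟩
    rw [← hm, Nat.div_div_eq_div_mul, ← pow_add, ← hk]
    congr 2
    omega

theorem pvNot_inSub_sibling {v : Nat} (hv : 1 ≤ v) : ¬ pvInSub (2 * v) (2 * v + 1) := by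
  rintro ⟨k, hk⟩
  match k, hk with
  | 0, hk => omega
  | k + 1, hk =>
    have h3 : 2 ≤ 2 ^ (k + 1) := by
      calc (2 : Nat) = 2 ^ 1 := by norm_num
        _ ≤ 2 ^ (k + 1) := Nat.pow_le_pow_right (by omega) (by omega)
    have : (2 * v + 1) / 2 ^ (k + 1) ≤ (2 * v + 1) / 2 :=
      Nat.div_le_div_left h3 (by omega)
    omega

theorem pvInSub_children_disjoint {v j : Nat} (hv : 1 ≤ v)
    (h1 : pvInSub (2 * v) j) : ¬ pvInSub (2 * v + 1) j := by
  intro h2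
  rcases pvInSub_total h1 h2 with h | h
  · exact pvNot_inSub_sibling hv h
  · have := pvInSub_le h; omega

theorem pvInSub_of_interval {v h i : Nat} (hi : i < 2 ^ h) : pvInSub v (v * 2 ^ h + i) := by
  refine ⟨h, ?_⟩
  rw [mul_comm v, Nat.mul_add_div (by positivity), Nat.div_eq_of_lt hi]
  omega

theorem pvNot_inSub_of_lt {v j : Nat} (h : j < v) : ¬ pvInSub v j := by
  intro hs; exact absurd (pvInSub_le hs) (by omega)

theorem pvUpd_self (t : Nat → Int × Int) (i : Nat) (x : Int × Int) : pvUpd t i x i = x := by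
  simp [pvUpd]

theorem pvUpd_ne (t : Nat → Int × Int) {i j : Nat} (x : Int × Int) (h : j ≠ i) :
    pvUpd t i x j = t j := by
  simp [pvUpd, h]

theorem pvUpd_good {t : Nat → Int × Int} {x : Int × Int} (hag : pvAllGood t) (hx : pvGood x)
    (i : Nat) : pvAllGood (pvUpd t i x) := by
  intro j
  by_cases h : j = i
  · subst h; rw [pvUpd_self]; exact hx
  · rw [pvUpd_ne _ _ h]; exact hag j

theorem pvRR_leaf {t : Nat → Int × Int} {v ℓ : Nat} (h : ℓ ≤ v) : pvRR t v ℓ = t v := by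
  rw [pvRR]; simp [h]

theorem pvRR_node {t : Nat → Int × Int} {v ℓ : Nat} (h : ¬ ℓ ≤ v) :
    pvRR t v ℓ = pvCombine (t ℓ) (pvRR t v (ℓ / 2)) := by
  rw [pvRR]; simp [h]

-- pvRR reads only the subtree of v
theorem pvRR_congr {t t' : Nat → Int × Int} {v ℓ : Nat} (hv : 1 ≤ v)
    (hag : ∀ j, pvInSub v j → t j = t' j) (hℓ : pvInSub v ℓ) :
    pvRR t v ℓ = pvRR t' v ℓ := by
  induction ℓ using Nat.strong_induction_on with
  | _ ℓ IH =>
    by_cases hle : ℓ ≤ v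
    · have hev : ℓ = v := le_antisymm hle (pvInSub_le hℓ)
      rw [pvRR_leaf hle, pvRR_leaf hle, hag v (pvInSub_self v)]
    · obtain ⟨hs, hlt⟩ := pvInSub_step hv hℓ (by omega)
      rw [pvRR_node hle, pvRR_node hle, hag ℓ hℓ, IH (ℓ / 2) (by omega) hs]

theorem pvRR_good {t : Nat → Int × Int} (hag : pvAllGood t) (v ℓ : Nat) :
    pvGood (pvRR t v ℓ) := by
  induction ℓ using Nat.strong_induction_on with
  | _ ℓ IH =>
    by_cases hle : ℓ ≤ v
    · rw [pvRR_leaf hle]; exact hag v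
    · rw [pvRR_node hle]
      exact pvCombine_good (hag ℓ) (IH (ℓ / 2) (by omega))

theorem pvRR_const (v ℓ : Nat) : pvRR (fun _ => ((0 : Int), (0 : Int))) v ℓ = (0, 0) := by
  induction ℓ using Nat.strong_induction_on with
  | _ ℓ IH =>
    by_cases hle : ℓ ≤ v
    · rw [pvRR_leaf hle]
    · rw [pvRR_node hle, IH (ℓ / 2) (by omega)]
      exact pvCombine_zero_left (Or.inl rfl)

-- updating the top node combines on the right of every resolved leaf value
theorem pvRR_upd_top {t : Nat → Int × Int} {v : Nat} {y : Int × Int} (hv : 1 ≤ v)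
    (hag : pvAllGood t) (hy : pvGood y) (ℓ : Nat) :
    pvRR (pvUpd t v (pvCombine (t v) y)) v ℓ = pvCombine (pvRR t v ℓ) y := by
  induction ℓ using Nat.strong_induction_on with
  | _ ℓ IH =>
    by_cases hle : ℓ ≤ v
    · rw [pvRR_leaf hle, pvRR_leaf hle, pvUpd_self]
    · rw [pvRR_node hle, pvRR_node hle, pvUpd_ne _ _ (by omega), IH (ℓ / 2) (by omega),
          ← pvCombine_assoc (hag ℓ) (pvRR_good hag v (ℓ / 2)) hy]

-- pushing the parent value into a child preserves resolved leaf values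
theorem pvRR_push {t : Nat → Int × Int} {v c ℓ : Nat} (hv : 1 ≤ v)
    (hc : c = 2 * v ∨ c = 2 * v + 1) (hℓ : pvInSub c ℓ) :
    pvRR t v ℓ = pvRR (pvUpd t c (pvCombine (t c) (t v))) c ℓ := by
  have hcv : c / 2 = v := by omega
  have hvc : v < c := by omega
  induction ℓ using Nat.strong_induction_on with
  | _ ℓ IH =>
    by_cases heq : ℓ = c
    · rw [heq, pvRR_node (show ¬ c ≤ v by omega), hcv, pvRR_leaf (le_refl v),
          pvRR_leaf (le_refl c), pvUpd_self]
    · obtain ⟨hs, hlt⟩ := pvInSub_step (by omega) hℓ heq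
      rw [pvRR_node (by omega : ¬ ℓ ≤ v), pvRR_node (by omega : ¬ ℓ ≤ c),
          pvUpd_ne _ _ (by omega), IH (ℓ / 2) (by omega) hs]

-- with a cleared parent, resolution restarts at the child
theorem pvRR_zero_top {t : Nat → Int × Int} {v c ℓ : Nat} (hv : 1 ≤ v)
    (h0 : t v = (0, 0)) (hag : pvAllGood t) (hc : c = 2 * v ∨ c = 2 * v + 1)
    (hℓ : pvInSub c ℓ) : pvRR t v ℓ = pvRR t c ℓ := by
  have hcv : c / 2 = v := by omega
  induction ℓ using Nat.strong_induction_on with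
  | _ ℓ IH =>
    by_cases heq : ℓ = c
    · rw [heq, pvRR_node (show ¬ c ≤ v by omega), hcv, pvRR_leaf (le_refl v),
          pvRR_leaf (le_refl c), h0, pvCombine_zero_right (hag c)]
    · obtain ⟨hs, hlt⟩ := pvInSub_step (by omega) hℓ heq
      rw [pvRR_node (by omega : ¬ ℓ ≤ v), pvRR_node (by omega : ¬ ℓ ≤ c), IH (ℓ / 2) (by omega) hs]

theorem pvTreeAdd_good (t : Nat → Int × Int) (v : Nat) (xl xr a b c : Int) :
    pvAllGood t → pvAllGood (pvTreeAdd t v xl xr a b c) := by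
  fun_induction pvTreeAdd with
  | case1 t v xl xr hdis => exact id
  | case2 t v xl xr hdis hcov =>
    exact fun hag => pvUpd_good hag (pvCombine_good (hag v) (Or.inr (Or.inr le_rfl))) v
  | case3 t v xl xr hdis hcov t1 t2 t3 xm ih3 ih2 ih1 =>
    intro hag
    have h1 : pvAllGood t1 := pvUpd_good hag (pvCombine_good (hag _) (hag _)) _
    have h2 : pvAllGood t2 := pvUpd_good h1 (pvCombine_good (h1 _) (h1 _)) _
    have h3 : pvAllGood t3 := pvUpd_good h2 (Or.inl rfl) _
    exact ih1 (ih3 h3)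

theorem pvTreeAdd_frame (t : Nat → Int × Int) (v : Nat) (xl xr a b c : Int) :
    ∀ j, 1 ≤ v → ¬ pvInSub v j → pvTreeAdd t v xl xr a b c j = t j := by
  fun_induction pvTreeAdd t v xl xr a b c with
  | case1 t v xl xr hdis => exact fun _ _ _ => rfl
  | case2 t v xl xr hdis hcov =>
    intro j hv hj
    exact pvUpd_ne _ _ (fun h => hj (by rw [h]; exact pvInSub_self v))
  | case3 t v xl xr hdis hcov t1 t2 t3 xm ih3 ih2 ih1 =>
    intro j hv hj
    have hj1 : ¬ pvInSub (2 * v) j := fun h => hj (pvInSub_trans (pvInSub_left v) h)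
    have hj2 : ¬ pvInSub (2 * v + 1) j := fun h => hj (pvInSub_trans (pvInSub_right v) h)
    rw [ih1 j (by omega) hj2, ih3 j (by omega) hj1]
    simp only [t3, t2, t1]
    rw [pvUpd_ne _ _ (fun h => hj (by rw [h]; exact pvInSub_self v)),
        pvUpd_ne _ _ (fun h => hj2 (by rw [h]; exact pvInSub_self _)),
        pvUpd_ne _ _ (fun h => hj1 (by rw [h]; exact pvInSub_self _))]

-- the midpoint of [xl, xl + 2^h - 1] for h ≥ 1
theorem pvMid (xl : Int) (h' : Nat) :
    PySem.Int.floordiv (xl + (xl + 2 ^ (h' + 1) - 1)) 2 = xl + 2 ^ h' - 1 := by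
  have hp : (0 : Int) < 2 ^ h' := by positivity
  rw [pow_succ, PySem.Int.floordiv_eq_iff_of_pos (by norm_num)]
  omega

-- on the subtree of 2v, the parent push only matters through the write at 2v
theorem pvPush_left {t : Nat → Int × Int} {v : Nat} (hv : 1 ≤ v) (X Y : Int × Int) :
    ∀ j, pvInSub (2 * v) j →
      pvUpd (pvUpd t (2 * v) X) (2 * v + 1) Y j = pvUpd t (2 * v) X j := by
  intro j hj
  exact pvUpd_ne _ _ (fun h => pvNot_inSub_sibling hv (h ▸ hj))

-- on the subtree of 2v+1, it only matters through the write at 2v+1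
theorem pvPush_right {t : Nat → Int × Int} {v : Nat} (hv : 1 ≤ v) (X Y : Int × Int) :
    ∀ j, pvInSub (2 * v + 1) j →
      pvUpd (pvUpd t (2 * v) X) (2 * v + 1) Y j = pvUpd t (2 * v + 1) Y j := by
  intro j hj
  by_cases hje : j = 2 * v + 1
  · rw [hje, pvUpd_self, pvUpd_self]
  · have hlt : 2 * v + 1 ≤ j := pvInSub_le hj
    rw [pvUpd_ne _ _ hje, pvUpd_ne _ _ (by omega), pvUpd_ne _ _ hje]

-- MAIN LEMMA (update): tree_add combines (c,1) onto exactly the leaves in [a,b]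
theorem pvTreeAdd_rr (h : Nat) : ∀ {v : Nat} {t : Nat → Int × Int} {xl a b c : Int} {i ℓ : Nat},
    1 ≤ v → pvAllGood t → i < 2 ^ h → ℓ = v * 2 ^ h + i →
    pvRR (pvTreeAdd t v xl (xl + 2 ^ h - 1) a b c) v ℓ =
      if a ≤ xl + (i : Int) ∧ xl + (i : Int) ≤ b then pvCombine (pvRR t v ℓ) (c, 1)
      else pvRR t v ℓ := by
  induction h with
  | zero =>
    intro v t xl a b c i ℓ hv hag hi hℓ
    have h20 : ((2 : Int) ^ (0 : Nat)) = 1 := pow_zero 2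
    have hi0 : i = 0 := by omega
    subst hi0
    rw [pvTreeAdd]
    by_cases hdis : b < xl ∨ xl + 2 ^ (0 : Nat) - 1 < a
    · rw [dif_pos hdis, if_neg (by push_cast; omega)]
    · rw [dif_neg hdis]
      rw [dif_pos (by omega), if_pos (by push_cast; omega)]
      exact pvRR_upd_top hv hag (Or.inr (Or.inr le_rfl)) ℓ
  | succ h' IH =>
    intro v t xl a b c i ℓ hv hag hi hℓ
    have hpI : (0 : Int) < 2 ^ h' := by positivity
    have hpsI : ((2 : Int) ^ (h' + 1)) = 2 ^ h' * 2 := pow_succ 2 h'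
    have hpN : 0 < 2 ^ h' := Nat.two_pow_pos h'
    have hpsN : (2 : Nat) ^ (h' + 1) = 2 ^ h' * 2 := pow_succ 2 h'
    have hcastp : ((2 ^ h' : Nat) : Int) = (2 : Int) ^ h' := by push_cast; ring
    have hiI : (i : Int) < 2 ^ (h' + 1) := by exact_mod_cast hi
    rw [pvTreeAdd]
    by_cases hdis : b < xl ∨ xl + 2 ^ (h' + 1) - 1 < a
    · rw [dif_pos hdis, if_neg (by omega)]
    · rw [dif_neg hdis]
      by_cases hcov : a ≤ xl ∧ xl + 2 ^ (h' + 1) - 1 ≤ b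
      · rw [dif_pos hcov, if_pos (by omega)]
        exact pvRR_upd_top hv hag (Or.inr (Or.inr le_rfl)) ℓ
      · rw [dif_neg hcov]
        dsimp only
        rw [pvUpd_ne t _ (show (2 * v + 1 : Nat) ≠ 2 * v by omega),
            pvUpd_ne t _ (show v ≠ 2 * v by omega), pvMid xl h']
        -- name the pushed trees
        set X := pvCombine (t (2 * v)) (t v) with hX
        set Y := pvCombine (t (2 * v + 1)) (t v) with hY
        set t3 := pvUpd (pvUpd (pvUpd t (2 * v) X) (2 * v + 1) Y) v (0, 0) with ht3
        set u := pvTreeAdd t3 (2 * v) xl (xl + 2 ^ h' - 1) a b c with hu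
        set w := pvTreeAdd u (2 * v + 1) (xl + 2 ^ h' - 1 + 1) (xl + 2 ^ (h' + 1) - 1) a b c
          with hw
        have hag3 : pvAllGood t3 := by
          apply pvUpd_good _ (Or.inl rfl)
          apply pvUpd_good _ (pvCombine_good (hag _) (hag _))
          exact pvUpd_good hag (pvCombine_good (hag _) (hag _)) _
        have hagu : pvAllGood u := pvTreeAdd_good _ _ _ _ _ _ _ hag3
        have hagw : pvAllGood w := pvTreeAdd_good _ _ _ _ _ _ _ hagu
        have hwv : w v = (0, 0) := by
          rw [hw, pvTreeAdd_frame _ _ _ _ _ _ _ v (by omega) (pvNot_inSub_of_lt (by omega)),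
              hu, pvTreeAdd_frame _ _ _ _ _ _ _ v (by omega) (pvNot_inSub_of_lt (by omega)),
              ht3, pvUpd_self]
        by_cases hiL : i < 2 ^ h'
        · -- leaf lies under the left child
          have hℓ' : ℓ = 2 * v * 2 ^ h' + i := by
            have e : v * 2 ^ (h' + 1) = 2 * v * 2 ^ h' := by rw [hpsN]; ring
            omega
          have hsubL : pvInSub (2 * v) ℓ := by
            rw [hℓ']; exact pvInSub_of_interval hiL
          rw [pvRR_zero_top hv hwv hagw (Or.inl rfl) hsubL]
          have hWU : ∀ j, pvInSub (2 * v) j → w j = u j := by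
            intro j hj
            exact pvTreeAdd_frame _ _ _ _ _ _ _ j (by omega)
              (pvInSub_children_disjoint hv hj)
          rw [pvRR_congr (by omega) hWU hsubL, hu,
              IH (by omega) hag3 hiL hℓ']
          have hT3 : ∀ j, pvInSub (2 * v) j → t3 j = pvUpd t (2 * v) X j := by
            intro j hj
            rw [ht3,
              pvUpd_ne _ _ (by intro hh; rw [hh] at hj; have hle := pvInSub_le hj; omega)]
            exact pvPush_left hv X Y j hj
          rw [pvRR_congr (by omega) hT3 hsubL, hX, ← pvRR_push hv (Or.inl rfl) hsubL]
        · -- leaf lies under the right child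
          have hii' : i = 2 ^ h' + (i - 2 ^ h') := by omega
          have hiR : i - 2 ^ h' < 2 ^ h' := by omega
          have hℓ' : ℓ = (2 * v + 1) * 2 ^ h' + (i - 2 ^ h') := by
            have e : v * 2 ^ (h' + 1) = 2 * v * 2 ^ h' := by rw [hpsN]; ring
            have e2 : (2 * v + 1) * 2 ^ h' = 2 * v * 2 ^ h' + 2 ^ h' := by ring
            omega
          have hsubR : pvInSub (2 * v + 1) ℓ := by
            rw [hℓ']; exact pvInSub_of_interval hiR
          rw [pvRR_zero_top hv hwv hagw (Or.inr rfl) hsubR, hw,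
              show xl + 2 ^ h' - 1 + 1 = xl + 2 ^ h' by ring,
              show xl + 2 ^ (h' + 1) - 1 = xl + 2 ^ h' + 2 ^ h' - 1 by rw [hpsI]; ring,
              IH (by omega) hagu hiR hℓ']
          rw [show xl + 2 ^ h' + ((i - 2 ^ h' : Nat) : Int) = xl + (i : Int) by omega]
          have hUT3 : ∀ j, pvInSub (2 * v + 1) j → u j = pvUpd t (2 * v + 1) Y j := by
            intro j hj
            rw [hu, pvTreeAdd_frame _ _ _ _ _ _ _ j (by omega)
              (fun hL => pvInSub_children_disjoint hv hL hj), ht3,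
              pvUpd_ne _ _ (by intro hh; rw [hh] at hj; have hle := pvInSub_le hj; omega)]
            exact pvPush_right hv X Y j hj
          rw [pvRR_congr (by omega) hUT3 hsubR, hY, ← pvRR_push hv (Or.inr rfl) hsubR]

theorem pvTreeCount_frame {K base : Int} : ∀ {f : Nat} {t : Nat → Int × Int} {v j : Nat},
    1 ≤ v → ¬ pvInSub v j → (pvTreeCount K base f t v).2 j = t j := by
  intro f
  induction f with
  | zero => intro t v j hv hj; rfl
  | succ f IH =>
    intro t v j hv hj
    rw [pvTreeCount]
    by_cases hleaf : base ≤ (v : Int)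
    · rw [if_pos hleaf]
    · rw [if_neg hleaf]
      dsimp only
      rw [IH (by omega) (fun h => hj (pvInSub_trans (pvInSub_right v) h)),
          IH (by omega) (fun h => hj (pvInSub_trans (pvInSub_left v) h)),
          pvUpd_ne _ _ (fun h => hj (by rw [h]; exact pvInSub_right v)),
          pvUpd_ne _ _ (fun h => hj (by rw [h]; exact pvInSub_left v))]

theorem pvTreeCount_congr {K base : Int} : ∀ {f : Nat} {t t' : Nat → Int × Int} {v : Nat},
    1 ≤ v → (∀ j, pvInSub v j → t j = t' j) →
    (pvTreeCount K base f t v).1 = (pvTreeCount K base f t' v).1 := by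
  intro f
  induction f with
  | zero => intro t t' v hv h; rfl
  | succ f IH =>
    intro t t' v hv h
    rw [pvTreeCount, pvTreeCount]
    by_cases hleaf : base ≤ (v : Int)
    · rw [if_pos hleaf, if_pos hleaf]
      dsimp only
      rw [h v (pvInSub_self v)]
    · rw [if_neg hleaf, if_neg hleaf]
      dsimp only
      rw [pvUpd_ne t _ (show (2 * v + 1 : Nat) ≠ 2 * v by omega),
          pvUpd_ne t _ (show v ≠ 2 * v by omega),
          pvUpd_ne t' _ (show (2 * v + 1 : Nat) ≠ 2 * v by omega),
          pvUpd_ne t' _ (show v ≠ 2 * v by omega)]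
      set t2 := pvUpd (pvUpd t (2 * v) (pvCombine (t (2 * v)) (t v))) (2 * v + 1)
        (pvCombine (t (2 * v + 1)) (t v)) with ht2
      set t2' := pvUpd (pvUpd t' (2 * v) (pvCombine (t' (2 * v)) (t' v))) (2 * v + 1)
        (pvCombine (t' (2 * v + 1)) (t' v)) with ht2'
      have e2 : ∀ j, pvInSub v j → t2 j = t2' j := by
        intro j hj
        by_cases hR : j = 2 * v + 1
        · rw [hR, ht2, ht2', pvUpd_self, pvUpd_self,
              h (2 * v + 1) (pvInSub_right v), h v (pvInSub_self v)]
        · rw [ht2, ht2', pvUpd_ne _ _ hR, pvUpd_ne _ _ hR]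
          by_cases hL : j = 2 * v
          · rw [hL, pvUpd_self, pvUpd_self, h (2 * v) (pvInSub_left v), h v (pvInSub_self v)]
          · rw [pvUpd_ne _ _ hL, pvUpd_ne _ _ hL, h j hj]
      have c1 : (pvTreeCount K base f t2 (2 * v)).1 = (pvTreeCount K base f t2' (2 * v)).1 :=
        IH (by omega) (fun j hj => e2 j (pvInSub_trans (pvInSub_left v) hj))
      have c2 : (pvTreeCount K base f (pvTreeCount K base f t2 (2 * v)).2 (2 * v + 1)).1 =
          (pvTreeCount K base f (pvTreeCount K base f t2' (2 * v)).2 (2 * v + 1)).1 := by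
        apply IH (by omega)
        intro j hj
        rw [pvTreeCount_frame (by omega) (fun hL => pvInSub_children_disjoint hv hL hj),
            pvTreeCount_frame (by omega) (fun hL => pvInSub_children_disjoint hv hL hj),
            e2 j (pvInSub_trans (pvInSub_right v) hj)]
      rw [c1, c2]

-- MAIN LEMMA (count): tree_count sums the leaf predicate over resolved values
theorem pvTreeCount_eq_sum {K : Int} {d : Nat} : ∀ {f h v : Nat} {t : Nat → Int × Int},
    1 ≤ v → pvAllGood t → 2 ^ d ≤ v * 2 ^ h → (v + 1) * 2 ^ h ≤ 2 ^ (d + 1) → h < f →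
    (pvTreeCount K ((2 : Int) ^ d) f t v).1 =
      ((List.range (2 ^ h)).map (fun i =>
        if (pvRR t v (v * 2 ^ h + i)).1 = 1 ∧ (pvRR t v (v * 2 ^ h + i)).2 = K
        then (1 : Int) else 0)).sum := by
  intro f
  induction f with
  | zero => intro h v t _ _ _ _ hf; omega
  | succ f IH =>
    intro h v t hv hag H1 H2 hf
    have hcd : ((2 ^ d : Nat) : Int) = (2 : Int) ^ d := by push_cast; ring
    rw [pvTreeCount]
    by_cases hleaf : (2 : Int) ^ d ≤ (v : Int)
    · rw [if_pos hleaf]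
      have hvN : 2 ^ d ≤ v := by exact_mod_cast hcd ▸ hleaf
      have hh0 : h = 0 := by
        rcases h with _ | h'
        · rfl
        · exfalso
          have e1 : (v + 1) * 2 ^ (h' + 1) = (v + 1) * 2 ^ h' * 2 := by rw [pow_succ]; ring
          have e2 : (2 : Nat) ^ (d + 1) = 2 ^ d * 2 := by rw [pow_succ]
          have e3 : v + 1 ≤ (v + 1) * 2 ^ h' :=
            Nat.le_mul_of_pos_right _ (Nat.two_pow_pos h')
          omega
      subst hh0
      simp only [pow_zero, List.range_one, List.map_cons, List.map_nil, List.sum_cons,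
        List.sum_nil, mul_one, add_zero]
      rw [pvRR_leaf (le_refl v)]
    · rw [if_neg hleaf]
      dsimp only
      have hvN : ¬ 2 ^ d ≤ v := fun hc => hleaf (hcd ▸ (by exact_mod_cast hc))
      rcases h with _ | h'
      · exfalso; simp at H1; omega
      · rw [pvUpd_ne t _ (show (2 * v + 1 : Nat) ≠ 2 * v by omega),
            pvUpd_ne t _ (show v ≠ 2 * v by omega)]
        set X := pvCombine (t (2 * v)) (t v) with hX
        set Y := pvCombine (t (2 * v + 1)) (t v) with hY
        set t2 := pvUpd (pvUpd t (2 * v) X) (2 * v + 1) Y with ht2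
        have hag2 : pvAllGood t2 := by
          apply pvUpd_good _ (pvCombine_good (hag _) (hag _))
          exact pvUpd_good hag (pvCombine_good (hag _) (hag _)) _
        have hps : (2 : Nat) ^ (h' + 1) = 2 ^ h' * 2 := pow_succ 2 h'
        -- left child count
        have c1 : (pvTreeCount K ((2 : Int) ^ d) f t2 (2 * v)).1 =
            ((List.range (2 ^ h')).map (fun i =>
              if (pvRR t v (2 * v * 2 ^ h' + i)).1 = 1 ∧ (pvRR t v (2 * v * 2 ^ h' + i)).2 = K
              then (1 : Int) else 0)).sum := by
          rw [IH (h := h') (v := 2 * v) (t := t2) (by omega) hag2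
            (by have e : 2 * v * 2 ^ h' = v * 2 ^ (h' + 1) := by rw [hps]; ring
                omega)
            (by have e : (2 * v + 1 + 1) * 2 ^ h' = (v + 1) * 2 ^ (h' + 1) := by rw [hps]; ring
                have e3 : (2 * v + 1) * 2 ^ h' ≤ (2 * v + 1 + 1) * 2 ^ h' :=
                  Nat.mul_le_mul_right _ (by omega)
                omega)
            (by omega)]
          apply congrArg
          apply List.map_congr_left
          intro i hi
          have hiN : i < 2 ^ h' := List.mem_range.mp hi
          have hsub : pvInSub (2 * v) (2 * v * 2 ^ h' + i) := pvInSub_of_interval hiN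
          have hcg : ∀ j, pvInSub (2 * v) j → t2 j = pvUpd t (2 * v) X j :=
            fun j hj => pvPush_left hv X Y j hj
          rw [pvRR_congr (by omega) hcg hsub, hX, ← pvRR_push hv (Or.inl rfl) hsub]
        -- right child count
        have c2 : (pvTreeCount K ((2 : Int) ^ d) f
              (pvTreeCount K ((2 : Int) ^ d) f t2 (2 * v)).2 (2 * v + 1)).1 =
            ((List.range (2 ^ h')).map (fun i =>
              if (pvRR t v ((2 * v + 1) * 2 ^ h' + i)).1 = 1 ∧
                  (pvRR t v ((2 * v + 1) * 2 ^ h' + i)).2 = K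
              then (1 : Int) else 0)).sum := by
          have hcg0 : ∀ j, pvInSub (2 * v + 1) j →
              (pvTreeCount K ((2 : Int) ^ d) f t2 (2 * v)).2 j = t2 j :=
            fun j hj => pvTreeCount_frame (by omega)
              (fun hL => pvInSub_children_disjoint hv hL hj)
          rw [pvTreeCount_congr (by omega) hcg0]
          rw [IH (h := h') (v := 2 * v + 1) (t := t2) (by omega) hag2
            (by have e : (2 * v + 1) * 2 ^ h' = v * 2 ^ (h' + 1) + 2 ^ h' := by rw [hps]; ring
                omega)
            (by have e : (2 * v + 1 + 1) * 2 ^ h' = (v + 1) * 2 ^ (h' + 1) := by rw [hps]; ring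
                omega)
            (by omega)]
          apply congrArg
          apply List.map_congr_left
          intro i hi
          have hiN : i < 2 ^ h' := List.mem_range.mp hi
          have hsub : pvInSub (2 * v + 1) ((2 * v + 1) * 2 ^ h' + i) := pvInSub_of_interval hiN
          have hcg : ∀ j, pvInSub (2 * v + 1) j → t2 j = pvUpd t (2 * v + 1) Y j :=
            fun j hj => pvPush_right hv X Y j hj
          rw [pvRR_congr (by omega) hcg hsub, hY, ← pvRR_push hv (Or.inr rfl) hsub]
        rw [c1, c2]
        -- split the parent's leaf range into the two children's ranges
        rw [show (2 : Nat) ^ (h' + 1) = 2 ^ h' + 2 ^ h' by rw [hps]; ring]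
        rw [List.range_add, List.map_append, List.sum_append, List.map_map]
        congr 1
        · apply congrArg
          apply List.map_congr_left
          intro i hi
          have e : v * 2 ^ (h' + 1) + i = 2 * v * 2 ^ h' + i := by
            have e2 : v * 2 ^ (h' + 1) = 2 * v * 2 ^ h' := by rw [hps]; ring
            omega
          rw [show (2 : Nat) ^ (h' + 1) = 2 ^ h' + 2 ^ h' from by rw [hps]; ring] at e
          rw [e]
        · apply congrArg
          apply List.map_congr_left
          intro i hi
          show (fun i => _) i = _
          dsimp only [Function.comp]
          have e : v * (2 ^ h' + 2 ^ h') + (2 ^ h' + i) = (2 * v + 1) * 2 ^ h' + i := by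
            have e2 : v * (2 ^ h' + 2 ^ h') = 2 * v * 2 ^ h' := by ring
            have e3 : (2 * v + 1) * 2 ^ h' = 2 * v * 2 ^ h' + 2 ^ h' := by ring
            omega
          rw [e]

theorem pvCellStep_eq_combine {st : Int × Int} (hst : pvGood st) (pos : Int)
    (u : Int × Int × Int) :
    pvCellStep pos st u =
      if u.1 - 1 ≤ pos ∧ pos ≤ u.2.1 - 1 then pvCombine st (u.2.2, 1) else st := by
  by_cases hc : u.1 - 1 ≤ pos ∧ pos ≤ u.2.1 - 1
  · simp only [pvCellStep, if_pos hc]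
    rcases hst with rfl | rfl | h
    · rw [pvCombine_zero_left (Or.inr (Or.inr le_rfl))]
      norm_num
    · rw [pvCombine_bot_left]
      norm_num
    · obtain ⟨sc, ss⟩ := st
      simp only at h
      rw [pvCombine_pos h le_rfl]
      rw [if_neg (by omega), if_neg (by omega)]
  · simp only [pvCellStep, if_neg hc]

-- folding tree_add over the updates resolves each leaf to B's per-cell fold
theorem pvFoldAdd_rr {d : Nat} : ∀ (l : List (Int × Int × Int)) (t : Nat → Int × Int) (pos : Nat),
    pvAllGood t → pos < 2 ^ d →
    pvRR (l.foldl (fun t u => pvTreeAdd t 1 0 ((2 : Int) ^ d - 1) (u.1 - 1) (u.2.1 - 1) u.2.2) t)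
        1 (2 ^ d + pos) =
      l.foldl (pvCellStep (pos : Int)) (pvRR t 1 (2 ^ d + pos)) := by
  intro l
  induction l with
  | nil => intro t pos _ _; rfl
  | cons u l IH =>
    intro t pos hag hpos
    simp only [List.foldl_cons]
    rw [IH _ pos (pvTreeAdd_good _ _ _ _ _ _ _ hag) hpos]
    congr 1
    have hstep :
        pvRR (pvTreeAdd t 1 0 ((2 : Int) ^ d - 1) (u.1 - 1) (u.2.1 - 1) u.2.2) 1 (2 ^ d + pos) =
          if u.1 - 1 ≤ 0 + (pos : Int) ∧ 0 + (pos : Int) ≤ u.2.1 - 1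
          then pvCombine (pvRR t 1 (2 ^ d + pos)) (u.2.2, 1)
          else pvRR t 1 (2 ^ d + pos) := by
      rw [show ((2 : Int) ^ d - 1) = 0 + 2 ^ d - 1 by ring]
      exact pvTreeAdd_rr d (le_refl 1) hag hpos (by omega)
    rw [hstep, pvCellStep_eq_combine (pvRR_good hag 1 _) _ u]
    simp only [zero_add]

theorem pvFoldAdd_good {d : Nat} : ∀ (l : List (Int × Int × Int)) (t : Nat → Int × Int),
    pvAllGood t →
    pvAllGood (l.foldl (fun t u => pvTreeAdd t 1 0 ((2 : Int) ^ d - 1) (u.1 - 1) (u.2.1 - 1) u.2.2) t) := by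
  intro l
  induction l with
  | nil => exact fun t h => h
  | cons u l IH =>
    intro t hag
    exact IH _ (pvTreeAdd_good _ _ _ _ _ _ _ hag)

theorem pvPow2Loop_pow (f : Nat) (N : Int) :
    ∀ (k : Nat), ∃ d : Nat, pvPow2Loop f N ((2 : Int) ^ k) = (2 : Int) ^ d := by
  induction f with
  | zero => exact fun k => ⟨k, rfl⟩
  | succ f IH =>
    intro k
    simp only [pvPow2Loop]
    by_cases h : (2 : Int) ^ k < N
    · rw [if_pos h, show (2 : Int) ^ k * 2 = 2 ^ (k + 1) from (pow_succ 2 k).symm]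
      exact IH (k + 1)
    · rw [if_neg h]
      exact ⟨k, rfl⟩

theorem pvFoldl_add_eq_sum (g : Int → Int) (l : List Int) : ∀ (init : Int),
    l.foldl (fun c x => c + g x) init = init + (l.map g).sum := by
  induction l with
  | nil => intro init; simp
  | cons x l IH =>
    intro init
    simp only [List.foldl_cons, List.map_cons, List.sum_cons, IH]
    ring

-- the whole pipeline, for base = 2^d
theorem pvCore (K : Int) (d : Nat) (L : List (Int × Int × Int)) :
    (pvTreeCount K ((2 : Int) ^ d) (2 * (2 : Int) ^ d).toNat
      (L.foldl (fun t u => pvTreeAdd t 1 0 ((2 : Int) ^ d - 1) (u.1 - 1) (u.2.1 - 1) u.2.2)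
        (fun _ => ((0 : Int), (0 : Int)))) 1).1 =
    (PySem.List.pyRange 0 ((2 : Int) ^ d) 1).foldl (fun cnt pos =>
      cnt + (if (L.foldl (pvCellStep pos) ((0 : Int), (0 : Int))).1 = 1 ∧
                (L.foldl (pvCellStep pos) ((0 : Int), (0 : Int))).2 = K
             then (1 : Int) else 0)) 0 := by
  have hg0 : pvAllGood (fun _ => ((0 : Int), (0 : Int))) := fun _ => Or.inl rfl
  have hT : pvAllGood _ := pvFoldAdd_good (d := d) L _ hg0
  have hcd : ((2 ^ d : Nat) : Int) = (2 : Int) ^ d := by push_cast; ring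
  have htn : (2 * (2 : Int) ^ d).toNat = 2 ^ (d + 1) := by
    rw [show 2 * (2 : Int) ^ d = ((2 ^ (d + 1) : Nat) : Int) by push_cast; ring]
    exact Int.toNat_natCast _
  rw [htn, pvTreeCount_eq_sum (d := d) (h := d) (le_refl 1) hT
    (by omega)
    (by have e : (1 + 1) * 2 ^ d = 2 ^ (d + 1) := by rw [pow_succ]; ring
        omega)
    (by have h1 : d < 2 ^ d := Nat.lt_two_pow_self
        have h2 : (2 : Nat) ^ d ≤ 2 ^ (d + 1) := Nat.pow_le_pow_right (by omega) (by omega)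
        omega)]
  rw [PySem.List.pyRange_one, sub_zero, show ((2 : Int) ^ d).toNat = 2 ^ d by
    rw [← hcd]; exact Int.toNat_natCast _]
  rw [pvFoldl_add_eq_sum (fun pos =>
      (if (L.foldl (pvCellStep pos) ((0 : Int), (0 : Int))).1 = 1 ∧
          (L.foldl (pvCellStep pos) ((0 : Int), (0 : Int))).2 = K
       then (1 : Int) else 0))]
  rw [zero_add, List.map_map]
  apply congrArg
  apply List.map_congr_left
  intro i hi
  have hiN : i < 2 ^ d := List.mem_range.mp hi
  simp only [Function.comp_apply, zero_add]
  rw [show 1 * 2 ^ d + i = 2 ^ d + i by omega,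
      pvFoldAdd_rr L _ i hg0 hiN, pvRR_const]

-- ===== VERDICT (by name: the statement is the Claim_ definition above) =====

-- ===== bridging the array ports to the functional model =====
theorem pvTreeAddA_size (t : Array (Int × Int)) (v : Nat) (xl xr a b c : Int) :
    (pvTreeAddA t v xl xr a b c).size = t.size := by
  fun_induction pvTreeAddA with
  | case1 t v xl xr hdis => rfl
  | case2 t v xl xr hdis hcov => simp
  | case3 t v xl xr hdis hcov t1 t2 t3 xm ih3 ih2 ih1 =>
    rw [ih1, ih3]
    simp [t3, t2, t1]

theorem pvTreeAddA_comm (h : Nat) : ∀ {v : Nat} {t : Array (Int × Int)} {xl a b c : Int},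
    1 ≤ v → (v + 1) * 2 ^ h ≤ t.size →
    pvToFun (pvTreeAddA t v xl (xl + 2 ^ h - 1) a b c) =
      pvTreeAdd (pvToFun t) v xl (xl + 2 ^ h - 1) a b c := by
  induction h with
  | zero =>
    intro v t xl a b c hv hsz
    have e0 : (v + 1) * 2 ^ (0 : Nat) = v + 1 := by norm_num
    have h20 : ((2 : Int) ^ (0 : Nat)) = 1 := pow_zero 2
    rw [pvTreeAddA, pvTreeAdd]
    by_cases hdis : b < xl ∨ xl + 2 ^ (0 : Nat) - 1 < a
    · rw [dif_pos hdis, dif_pos hdis]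
    · have hcov : a ≤ xl ∧ xl + 2 ^ (0 : Nat) - 1 ≤ b := by omega
      rw [dif_neg hdis, dif_neg hdis, dif_pos hcov, dif_pos hcov,
          pvToFun_set (by omega) _]
      rfl
  | succ h' IH =>
    intro v t xl a b c hv hsz
    have hpN : 0 < 2 ^ h' := Nat.two_pow_pos h'
    have epow : (v + 1) * 2 ^ (h' + 1) = (v + 1) * 2 ^ h' * 2 := by rw [pow_succ]; ring
    have e3 : v + 1 ≤ (v + 1) * 2 ^ h' := Nat.le_mul_of_pos_right _ hpN
    have hsz' : 2 * v + 1 < t.size := by omega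
    rw [pvTreeAddA, pvTreeAdd]
    by_cases hdis : b < xl ∨ xl + 2 ^ (h' + 1) - 1 < a
    · rw [dif_pos hdis, dif_pos hdis]
    · by_cases hcov : a ≤ xl ∧ xl + 2 ^ (h' + 1) - 1 ≤ b
      · rw [dif_neg hdis, dif_neg hdis, dif_pos hcov, dif_pos hcov,
            pvToFun_set (by omega) _]
        rfl
      · rw [dif_neg hdis, dif_neg hdis, dif_neg hcov, dif_neg hcov]
        dsimp only
        rw [pvMid xl h',
            show xl + 2 ^ h' - 1 + 1 = xl + 2 ^ h' by ring,
            show xl + 2 ^ (h' + 1) - 1 = xl + 2 ^ h' + 2 ^ h' - 1 by rw [pow_succ]; ring]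
        set t3A := ((t.setIfInBounds (2 * v)
            (pvCombine (t.getD (2 * v) (0, 0)) (t.getD v (0, 0)))).setIfInBounds (2 * v + 1)
            (pvCombine ((t.setIfInBounds (2 * v)
                (pvCombine (t.getD (2 * v) (0, 0)) (t.getD v (0, 0)))).getD (2 * v + 1) (0, 0))
              ((t.setIfInBounds (2 * v)
                (pvCombine (t.getD (2 * v) (0, 0)) (t.getD v (0, 0)))).getD v (0, 0)))).setIfInBounds
            v (0, 0) with ht3A
        have hs3 : t3A.size = t.size := by rw [ht3A]; simp
        have he3 : pvToFun t3A =
            pvUpd (pvUpd (pvUpd (pvToFun t) (2 * v)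
                (pvCombine (pvToFun t (2 * v)) (pvToFun t v))) (2 * v + 1)
              (pvCombine (pvUpd (pvToFun t) (2 * v)
                  (pvCombine (pvToFun t (2 * v)) (pvToFun t v)) (2 * v + 1))
                (pvUpd (pvToFun t) (2 * v)
                  (pvCombine (pvToFun t (2 * v)) (pvToFun t v)) v))) v (0, 0) := by
          rw [ht3A, pvToFun_set (by simp; omega) _, pvToFun_set (by simp; omega) _,
              pvToFun_set (by omega) _,
              pvGetD_set (show 2 * v < t.size by omega) _ (2 * v + 1),
              pvGetD_set (show 2 * v < t.size by omega) _ v]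
          rfl
        have hsL : (pvTreeAddA t3A (2 * v) xl (xl + 2 ^ h' - 1) a b c).size = t.size := by
          rw [pvTreeAddA_size, hs3]
        have bndR : (2 * v + 1 + 1) * 2 ^ h' ≤ (pvTreeAddA t3A (2 * v) xl (xl + 2 ^ h' - 1) a b c).size := by
          rw [hsL]
          have e1 : (2 * v + 1 + 1) * 2 ^ h' = (v + 1) * 2 ^ h' * 2 := by ring
          omega
        have bndL : (2 * v + 1) * 2 ^ h' ≤ t3A.size := by
          rw [hs3]
          have e1 : (2 * v + 1) * 2 ^ h' ≤ (2 * v + 2) * 2 ^ h' :=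
            Nat.mul_le_mul_right _ (by omega)
          have e2 : (2 * v + 2) * 2 ^ h' = (v + 1) * 2 ^ h' * 2 := by ring
          omega
        rw [IH (by omega) bndR, IH (by omega) bndL, he3]

theorem pvTreeCountA_size {K base : Int} : ∀ {f : Nat} {t : Array (Int × Int)} {v : Nat},
    (pvTreeCountA K base f t v).2.size = t.size := by
  intro f
  induction f with
  | zero => intro t v; rfl
  | succ f IH =>
    intro t v
    rw [pvTreeCountA]
    by_cases hleaf : base ≤ (v : Int)
    · rw [if_pos hleaf]
    · rw [if_neg hleaf]
      dsimp only
      rw [IH, IH]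
      simp

theorem pvTreeCountA_comm {K base : Int} : ∀ {f : Nat} {t : Array (Int × Int)} {v : Nat},
    (∀ u : Nat, (u : Int) < base → 2 * u + 1 < t.size) →
    (pvTreeCountA K base f t v).1 = (pvTreeCount K base f (pvToFun t) v).1 ∧
    pvToFun (pvTreeCountA K base f t v).2 = (pvTreeCount K base f (pvToFun t) v).2 := by
  intro f
  induction f with
  | zero => intro t v hin; exact ⟨rfl, rfl⟩
  | succ f IH =>
    intro t v hin
    rw [pvTreeCountA, pvTreeCount]
    by_cases hleaf : base ≤ (v : Int)
    · rw [if_pos hleaf, if_pos hleaf]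
      exact ⟨rfl, rfl⟩
    · rw [if_neg hleaf, if_neg hleaf]
      dsimp only
      have h2v1 : 2 * v + 1 < t.size := hin v (by omega)
      set t2A := (t.setIfInBounds (2 * v)
          (pvCombine (t.getD (2 * v) (0, 0)) (t.getD v (0, 0)))).setIfInBounds (2 * v + 1)
          (pvCombine ((t.setIfInBounds (2 * v)
              (pvCombine (t.getD (2 * v) (0, 0)) (t.getD v (0, 0)))).getD (2 * v + 1) (0, 0))
            ((t.setIfInBounds (2 * v)
              (pvCombine (t.getD (2 * v) (0, 0)) (t.getD v (0, 0)))).getD v (0, 0))) with ht2A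
      have hs2 : t2A.size = t.size := by rw [ht2A]; simp
      have he2 : pvToFun t2A =
          pvUpd (pvUpd (pvToFun t) (2 * v) (pvCombine (pvToFun t (2 * v)) (pvToFun t v)))
            (2 * v + 1)
            (pvCombine (pvUpd (pvToFun t) (2 * v)
                (pvCombine (pvToFun t (2 * v)) (pvToFun t v)) (2 * v + 1))
              (pvUpd (pvToFun t) (2 * v)
                (pvCombine (pvToFun t (2 * v)) (pvToFun t v)) v)) := by
        rw [ht2A, pvToFun_set (by simp; omega) _, pvToFun_set (by omega) _,
            pvGetD_set (show 2 * v < t.size by omega) _ (2 * v + 1),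
            pvGetD_set (show 2 * v < t.size by omega) _ v]
        rfl
      have hin2 : ∀ u : Nat, (u : Int) < base → 2 * u + 1 < t2A.size := by
        intro u hu; rw [hs2]; exact hin u hu
      obtain ⟨c1, m1⟩ := IH (t := t2A) (v := 2 * v) hin2
      have hinr : ∀ u : Nat, (u : Int) < base → 2 * u + 1 <
          (pvTreeCountA K base f t2A (2 * v)).2.size := by
        intro u hu; rw [pvTreeCountA_size]; exact hin2 u hu
      obtain ⟨c2, m2⟩ := IH (t := (pvTreeCountA K base f t2A (2 * v)).2) (v := 2 * v + 1) hinr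
      constructor
      · rw [c1, c2, m1, he2]
      · rw [m2, m1, he2]

theorem pvFoldAddA_comm (d : Nat) (L : List (Int × Int × Int)) : ∀ (t : Array (Int × Int)),
    t.size = 2 ^ (d + 1) →
    pvToFun (L.foldl (fun t u => pvTreeAddA t 1 0 ((2 : Int) ^ d - 1) (u.1 - 1) (u.2.1 - 1) u.2.2) t) =
      L.foldl (fun t u => pvTreeAdd t 1 0 ((2 : Int) ^ d - 1) (u.1 - 1) (u.2.1 - 1) u.2.2)
        (pvToFun t) ∧
    (L.foldl (fun t u => pvTreeAddA t 1 0 ((2 : Int) ^ d - 1) (u.1 - 1) (u.2.1 - 1) u.2.2) t).size =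
      2 ^ (d + 1) := by
  induction L with
  | nil => exact fun t h => ⟨rfl, h⟩
  | cons u L IH =>
    intro t hsz
    simp only [List.foldl_cons]
    have hstep : pvToFun (pvTreeAddA t 1 0 ((2 : Int) ^ d - 1) (u.1 - 1) (u.2.1 - 1) u.2.2) =
        pvTreeAdd (pvToFun t) 1 0 ((2 : Int) ^ d - 1) (u.1 - 1) (u.2.1 - 1) u.2.2 := by
      rw [show ((2 : Int) ^ d - 1) = 0 + 2 ^ d - 1 by ring]
      exact pvTreeAddA_comm d (le_refl 1)
        (by rw [hsz]; have e : (1 + 1) * 2 ^ d = 2 ^ (d + 1) := by rw [pow_succ]; ring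
            omega)
    have hssz : (pvTreeAddA t 1 0 ((2 : Int) ^ d - 1) (u.1 - 1) (u.2.1 - 1) u.2.2).size =
        2 ^ (d + 1) := by rw [pvTreeAddA_size, hsz]
    obtain ⟨h1, h2⟩ := IH _ hssz
    exact ⟨by rw [h1, hstep], h2⟩

theorem cakeFactory_spec : Claim_equal_cakeFactory := by
  intro N K A B C _
  show cakeFactory N K A B C = cakeFactory_alt N K A B C
  obtain ⟨d, hbase⟩ := pvPow2Loop_pow 64 N 0
  rw [pow_zero] at hbase
  simp only [cakeFactory, cakeFactory_alt]
  rw [hbase]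
  have hcd : ((2 ^ d : Nat) : Int) = (2 : Int) ^ d := by push_cast; ring
  have htn : (2 * (2 : Int) ^ d).toNat = 2 ^ (d + 1) := by
    rw [show 2 * (2 : Int) ^ d = ((2 ^ (d + 1) : Nat) : Int) by push_cast; ring]
    exact Int.toNat_natCast _
  have hsz0 : (Array.replicate (2 * (2 : Int) ^ d).toNat ((0 : Int), (0 : Int))).size =
      2 ^ (d + 1) := by rw [Array.size_replicate, htn]
  obtain ⟨hfold, hfsz⟩ := pvFoldAddA_comm d (A.zip (B.zip C)) _ hsz0
  have hin : ∀ u : Nat, (u : Int) < (2 : Int) ^ d → 2 * u + 1 <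
      ((A.zip (B.zip C)).foldl
        (fun t u => pvTreeAddA t 1 0 ((2 : Int) ^ d - 1) (u.1 - 1) (u.2.1 - 1) u.2.2)
        (Array.replicate (2 * (2 : Int) ^ d).toNat ((0 : Int), (0 : Int)))).size := by
    intro u hu
    rw [hfsz]
    have huN : u < 2 ^ d := by exact_mod_cast hcd ▸ hu
    have e : (2 : Nat) ^ (d + 1) = 2 ^ d * 2 := by rw [pow_succ]
    omega
  obtain ⟨hc, -⟩ := pvTreeCountA_comm (f := (2 * (2 : Int) ^ d).toNat) (v := 1) hin
  rw [hc, hfold, pvToFun_replicate]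
  exact pvCore K d (A.zip (B.zip C))
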